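-- pv_equiv track=rewrite | github.com/SaiNikhita/TalentSprint | largest_power_of_2_in_collatz.py | highest_power_of_2
-- ===== SOURCE A (Python) =====
-- def highest_number_in_series(series):
--     return max(series)
--
-- def highest_power_of_2(series):
--     max_power = 4
--     end = highest_number_in_series(series)
--     i = max_power
--     while i <= end:
--         i = 2 * i
--         if i in series:
--             max_power = i
--     return max_power
-- ===== SOURCE B (Python) =====
-- # B: single pass over the elements keeping the largest power-of-two element >= 8
-- # (running best starts at 4), instead of doubling a candidate and membership-testing.
-- # A raises ValueError on an empty series (max([])); B returns the default 4 there.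
--
-- def _is_pow2(x):
--     while x > 1 and x % 2 == 0:
--         x //= 2
--     return x == 1
--
--
-- def highest_power_of_2(series):
--     best = 4
--     for x in series:
--         if x >= 8 and _is_pow2(x) and x > best:
--             best = x
--     return best
-- ===== Notes on version B (the rewrite author's own statement) =====
-- stated objective: simpler
-- what changed: B replaces A's doubling-candidate loop with an O(n) list-membership test per candidate by a single pass over the elements keeping the largest power-of-two element >= 8 (best starts at 4), so max() and the inner membership scans disappear.
import Mathlib
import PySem

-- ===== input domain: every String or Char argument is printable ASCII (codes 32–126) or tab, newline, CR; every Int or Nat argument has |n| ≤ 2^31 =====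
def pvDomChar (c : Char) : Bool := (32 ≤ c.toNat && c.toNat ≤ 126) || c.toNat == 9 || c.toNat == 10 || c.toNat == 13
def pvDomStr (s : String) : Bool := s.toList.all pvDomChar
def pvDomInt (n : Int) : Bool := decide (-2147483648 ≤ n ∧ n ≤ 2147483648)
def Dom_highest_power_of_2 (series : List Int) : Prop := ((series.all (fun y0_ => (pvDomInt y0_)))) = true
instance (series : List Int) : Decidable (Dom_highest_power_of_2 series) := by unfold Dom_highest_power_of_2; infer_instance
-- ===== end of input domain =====

-- B is a single pass over the elements keeping the largest power-of-two element ≥ 8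
-- (running best starts at 4), instead of A's doubling-candidate loop with membership tests.

-- ===== PORT A =====
-- the while loop: i doubles, candidates membership-tested; terminates because i grows toward end
def pvA_loop (series : List Int) (endv i max_power : Int) (hi : 0 < i) : Int :=
  if h : i ≤ endv then
    pvA_loop series endv (2 * i)
      (if series.contains (2 * i) then 2 * i else max_power) (by omega)
  else max_power
termination_by (endv + 1 - i).toNat
decreasing_by omega

def highest_power_of_2 (series : List Int) : Int :=
  -- end = max(series): Python raises ValueError on []; Pre_ excludes that, getD 0 is arbitrary
  let endv := (PySem.List.max? series (fun x => x)).getD 0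
  pvA_loop series endv 4 4 (by norm_num)

-- ===== PORT B =====
-- is_pow2 by repeated halving, exactly Source B's while loop
def pvB_isPow2 (x : Int) : Bool :=
  if 1 < x ∧ x % 2 = 0 then pvB_isPow2 (PySem.Int.floordiv x 2)
  else x == 1
termination_by x.toNat
decreasing_by
  rename_i h
  rw [PySem.Int.floordiv_eq_ediv_of_pos (by omega)]
  omega

def highest_power_of_2_alt (series : List Int) : Int :=
  series.foldl (fun best x => if 8 ≤ x ∧ pvB_isPow2 x ∧ best < x then x else best) 4

-- ===== PRECONDITION & SPEC =====
-- Pre_ excludes only the empty list, on which A raises ValueError (max of empty sequence); B returns the default 4 there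
def Pre_highest_power_of_2 (series : List Int) : Prop := series ≠ []
instance (series : List Int) : Decidable (Pre_highest_power_of_2 series) := by
  unfold Pre_highest_power_of_2; infer_instance

def pvWitness_highest_power_of_2 : List Int := ([3, 8, 16, 5])

def Spec_highest_power_of_2 (series : List Int) (out : Int) : Prop := out = highest_power_of_2_alt series
instance (series : List Int) (out : Int) : Decidable (Spec_highest_power_of_2 series out) := by unfold Spec_highest_power_of_2; infer_instance

-- ===== CLAIM (what is proved, stated in full; the proofs are below) =====
def Claim_equal_highest_power_of_2 : Prop := ∀ (series : List Int), Dom_highest_power_of_2 series → Pre_highest_power_of_2 series → Spec_highest_power_of_2 series (highest_power_of_2 series)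

-- ===== LEMMAS AND PROOFS =====

-- "x is a power of two and ≥ 8": the values A can ever assign to max_power / B to best
def pvGood (x : Int) : Prop := 8 ≤ x ∧ ∃ k : ℕ, x = 2 ^ k

theorem pvB_isPow2_iff (n : ℕ) : ∀ x : Int, x.toNat ≤ n → 0 < x →
    (pvB_isPow2 x = true ↔ ∃ k : ℕ, x = 2 ^ k) := by
  induction n with
  | zero => intro x h hx; omega
  | succ n ih =>
    intro x h hx
    rw [pvB_isPow2]
    by_cases hc : 1 < x ∧ x % 2 = 0
    · have h2 : PySem.Int.floordiv x 2 = x / 2 :=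
        PySem.Int.floordiv_eq_ediv_of_pos (by omega)
      rw [if_pos hc, h2, ih (x / 2) (by omega) (by omega)]
      constructor
      · rintro ⟨k, hk⟩; exact ⟨k + 1, by rw [pow_succ]; omega⟩
      · rintro ⟨k, hk⟩
        match k with
        | 0 => omega
        | j + 1 =>
          refine ⟨j, ?_⟩
          rw [pow_succ] at hk
          omega
    · rw [if_neg hc]
      constructor
      · intro h1
        exact ⟨0, by simpa using h1⟩
      · rintro ⟨k, hk⟩
        match k with
        | 0 => simpa using hk
        | j + 1 =>
          exfalso
          have hj : (1:ℤ) ≤ 2 ^ j := one_le_pow₀ (by norm_num)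
          rw [pow_succ] at hk
          omega

theorem pvGood_isPow2 (x : Int) (h8 : 8 ≤ x) : pvB_isPow2 x = true ↔ ∃ k : ℕ, x = 2 ^ k :=
  pvB_isPow2_iff x.toNat x (le_refl _) (by omega)

-- B's fold invariant
theorem pvB_fold_inv (xs : List Int) : ∀ b : Int,
    ((xs.foldl (fun best x => if 8 ≤ x ∧ pvB_isPow2 x ∧ best < x then x else best) b) = b ∨
      (pvGood (xs.foldl (fun best x => if 8 ≤ x ∧ pvB_isPow2 x ∧ best < x then x else best) b) ∧
       (xs.foldl (fun best x => if 8 ≤ x ∧ pvB_isPow2 x ∧ best < x then x else best) b) ∈ xs)) ∧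
    b ≤ xs.foldl (fun best x => if 8 ≤ x ∧ pvB_isPow2 x ∧ best < x then x else best) b ∧
    ∀ x ∈ xs, pvGood x →
      x ≤ xs.foldl (fun best x => if 8 ≤ x ∧ pvB_isPow2 x ∧ best < x then x else best) b := by
  induction xs with
  | nil => intro b; exact ⟨Or.inl rfl, le_refl _, by simp⟩
  | cons x xs ih =>
    intro b
    simp only [List.foldl_cons]
    obtain ⟨hr, hbr, hcov⟩ := ih (if 8 ≤ x ∧ pvB_isPow2 x ∧ b < x then x else b)
    by_cases hc : 8 ≤ x ∧ pvB_isPow2 x = true ∧ b < x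
    · rw [if_pos hc] at hr hbr hcov ⊢
      refine ⟨?_, by omega, ?_⟩
      · rcases hr with hr | ⟨hg, hm⟩
        · rw [hr]
          exact Or.inr ⟨⟨hc.1, (pvGood_isPow2 x hc.1).mp hc.2.1⟩, List.mem_cons_self⟩
        · exact Or.inr ⟨hg, List.mem_cons_of_mem _ hm⟩
      · intro y hy hgy
        rcases List.mem_cons.mp hy with rfl | hy
        · omega
        · exact hcov y hy hgy
    · rw [if_neg hc] at hr hbr hcov ⊢
      refine ⟨?_, hbr, ?_⟩
      · rcases hr with hr | ⟨hg, hm⟩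
        · exact Or.inl hr
        · exact Or.inr ⟨hg, List.mem_cons_of_mem _ hm⟩
      · intro y hy hgy
        rcases List.mem_cons.mp hy with rfl | hy
        · have hip := (pvGood_isPow2 y hgy.1).mpr hgy.2
          have hby : ¬ b < y := fun hb => hc ⟨hgy.1, hip, hb⟩
          omega
        · exact hcov y hy hgy

-- A's loop invariant, by induction on the loop's own measure
theorem pvA_loop_inv (series : List Int) (endv : Int)
    (hub : ∀ x ∈ series, x ≤ endv) :
    ∀ n : ℕ, ∀ i m : Int, ∀ hi : 0 < i, ∀ k : ℕ,
    (endv + 1 - i).toNat ≤ n → i = 2 ^ k → 4 ≤ i →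
    (m = 4 ∨ (pvGood m ∧ m ∈ series)) → m ≤ i →
    (∀ x ∈ series, pvGood x → x ≤ i → x ≤ m) →
    ((pvA_loop series endv i m hi = 4 ∨
       (pvGood (pvA_loop series endv i m hi) ∧ pvA_loop series endv i m hi ∈ series)) ∧
     m ≤ pvA_loop series endv i m hi ∧
     ∀ x ∈ series, pvGood x → x ≤ pvA_loop series endv i m hi) := by
  intro n
  induction n with
  | zero =>
    intro i m hi k hn hik hi4 hm hmi hcov
    have hie : ¬ i ≤ endv := by omega
    rw [pvA_loop, dif_neg hie]
    exact ⟨hm.imp id (fun h => h), le_refl _,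
      fun x hx hgx => hcov x hx hgx (le_trans (hub x hx) (by omega))⟩
  | succ n ih =>
    intro i m hi k hn hik hi4 hm hmi hcov
    rw [pvA_loop]
    by_cases hie : i ≤ endv
    · rw [dif_pos hie]
      set m' := if series.contains (2 * i) then 2 * i else m with hm'def
      have hmm' : m ≤ m' := by
        rw [hm'def]; split_ifs with hc
        · omega
        · exact le_refl _
      have hstep := ih (2 * i) m' (by omega) (k + 1) (by omega)
        (by rw [hik, pow_succ]; ring) (by omega)
        (by
          rw [hm'def]; split_ifs with hc
          · exact Or.inr ⟨⟨by omega, k + 1, by rw [hik, pow_succ]; ring⟩, by simpa using hc⟩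
          · exact hm)
        (by rw [hm'def]; split_ifs <;> omega)
        (by
          intro x hx hgx hx2i
          by_cases hxi : x ≤ i
          · exact le_trans (hcov x hx hgx hxi) hmm'
          · -- i < x ≤ 2 i and x a power of two forces x = 2 * i
            obtain ⟨h8, j, hj⟩ := hgx
            have hkj : k < j := by
              refine (pow_lt_pow_iff_right₀ (a := (2:ℤ)) (by norm_num)).mp ?_
              omega
            have h2i : (2:ℤ) ^ (k + 1) = 2 * i := by rw [hik, pow_succ]; ring
            have hjk : j ≤ k + 1 := by
              refine (pow_le_pow_iff_right₀ (a := (2:ℤ)) (by norm_num)).mp ?_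
              omega
            have hx2 : x = 2 * i := by
              have hje : j = k + 1 := by omega
              rw [hje] at hj
              omega
            have hcont : series.contains (2 * i) = true := by
              rw [← hx2]; simpa using hx
            rw [hm'def, if_pos hcont]
            omega)
      exact ⟨hstep.1, le_trans hmm' hstep.2.1, hstep.2.2⟩
    · rw [dif_neg hie]
      exact ⟨hm.imp id (fun h => h), le_refl _,
        fun x hx hgx => hcov x hx hgx (le_trans (hub x hx) (by omega))⟩

-- ===== VERDICT (by name: the statement is the Claim_ definition above) =====
theorem highest_power_of_2_spec : Claim_equal_highest_power_of_2 := by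
  intro series _ hpre
  have pf : (0:Int) < 4 := by norm_num
  -- max(series) exists and bounds every element
  obtain ⟨m0, hm0⟩ : ∃ m0, PySem.List.max? series (fun x => x) = some m0 := by
    cases h : PySem.List.max? series (fun x => x) with
    | none => exact absurd ((PySem.List.max?_eq_none_iff series _).mp h) hpre
    | some v => exact ⟨v, rfl⟩
  have hub : ∀ x ∈ series, x ≤ (PySem.List.max? series (fun x => x)).getD 0 := by
    intro x hx
    rw [hm0]
    simpa using PySem.List.max?_isMax hm0 x hx
  obtain ⟨hA1, hA2, hA3⟩ := pvA_loop_inv series _ hub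
    ((((PySem.List.max? series (fun x => x)).getD 0) + 1 - 4).toNat) 4 4 pf 2
    (le_refl _) (by norm_num) (by norm_num) (Or.inl rfl) (by norm_num)
    (fun x _ hgx h4 => by obtain ⟨h8, _⟩ := hgx; omega)
  obtain ⟨hB1, hB2, hB3⟩ := pvB_fold_inv series 4
  have hAeq : highest_power_of_2 series =
      pvA_loop series ((PySem.List.max? series (fun x => x)).getD 0) 4 4 pf := rfl
  have hBeq : highest_power_of_2_alt series =
      series.foldl (fun best x => if 8 ≤ x ∧ pvB_isPow2 x ∧ best < x then x else best) 4 := rfl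
  unfold Spec_highest_power_of_2
  rw [hAeq, hBeq]
  -- both results are the greatest good element, or 4 when there is none
  rcases hA1 with hA4 | ⟨hAg, hAm⟩
  · rcases hB1 with hB4 | ⟨hBg, hBm⟩
    · omega
    · have := hA3 _ hBm hBg
      obtain ⟨h8, _⟩ := hBg
      omega
  · rcases hB1 with hB4 | ⟨hBg, hBm⟩
    · have := hB3 _ hAm hAg
      obtain ⟨h8, _⟩ := hAg
      omega
    · have h1 := hA3 _ hBm hBg
      have h2 := hB3 _ hAm hAg
      omega
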